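-- pv_equiv track=rewrite | github.com/ayokura/kalimba-transcription | apps/api/app/transcription/peaks.py | is_physically_playable_chord
-- ===== SOURCE A (Python) =====
-- def is_physically_playable_chord(keys: list[int], key_layers: dict[int, int] | None = None) -> bool:
--     """Check if a set of keys can be played simultaneously on a kalimba.
--
--     One thumb can slide across consecutive keys (2-4 tines).
--     The other thumb can strict-press 1-2 adjacent keys.
--     Either thumb can reach any part of the instrument.
--     Valid chords must be splittable into:
--       - a slide group (consecutive keys, any length) + a strict group (≤2 adjacent keys)
--
--     When *key_layers* is provided, consecutive-key checks also require that
--     adjacent keys share the same layer.  On a 34-key kalimba, keys 17 (bottom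
--     layer) and 18 (top layer) are numerically adjacent but physically separated.
--     """
--     if len(keys) <= 2:
--         if key_layers is not None and len(keys) == 2:
--             k0, k1 = sorted(keys)
--             if abs(k1 - k0) == 1 and key_layers.get(k0) != key_layers.get(k1):
--                 return False
--         return True
--     unique = sorted(set(keys))
--     n = len(unique)
--     if n > 4:
--         return False
--
--     def _same_layer_adjacent(a: int, b: int) -> bool:
--         if b - a != 1:
--             return False
--         if key_layers is not None and key_layers.get(a) != key_layers.get(b):
--             return False
--         return True
--
--     def _consecutive(ks: list[int]) -> bool:
--         return len(ks) <= 1 or all(_same_layer_adjacent(ks[i], ks[i + 1]) for i in range(len(ks) - 1))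
--
--     def _strict_ok(ks: list[int]) -> bool:
--         return len(ks) <= 1 or (len(ks) == 2 and _same_layer_adjacent(ks[0], ks[1]))
--
--     # Try all ways to split into slide group + strict group
--     for mask in range(1 << n):
--         slide = [unique[i] for i in range(n) if mask & (1 << i)]
--         strict = [unique[i] for i in range(n) if not (mask & (1 << i))]
--         if len(slide) < 1 or len(strict) > 2:
--             continue
--         if _consecutive(slide) and _strict_ok(strict):
--             return True
--     return False
-- ===== SOURCE B (Python) =====
-- def is_physically_playable_chord(keys: list[int], key_layers: dict[int, int] | None = None) -> bool:
--     """Window-based re-implementation: a valid chord is a contiguous window of the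
--     sorted unique keys (the slide group) whose complement (prefix + suffix) is a
--     strict group of at most 2 adjacent keys."""
--     if len(keys) <= 2:
--         if key_layers is not None and len(keys) == 2:
--             k0, k1 = sorted(keys)
--             if abs(k1 - k0) == 1 and key_layers.get(k0) != key_layers.get(k1):
--                 return False
--         return True
--     unique = sorted(set(keys))
--     n = len(unique)
--     if n > 4:
--         return False
--
--     def same_layer_adjacent(a: int, b: int) -> bool:
--         return b - a == 1 and (key_layers is None or key_layers.get(a) == key_layers.get(b))
--
--     def window_ok(i: int, j: int) -> bool:
--         win = unique[i:j]
--         rest = unique[:i] + unique[j:]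
--         if len(rest) > 2:
--             return False
--         if any(not same_layer_adjacent(x, y) for x, y in zip(win, win[1:])):
--             return False
--         if len(rest) == 2 and not same_layer_adjacent(rest[0], rest[1]):
--             return False
--         return True
--
--     return any(window_ok(i, j) for i in range(n) for j in range(i + 1, n + 1))
-- ===== Notes on version B (the rewrite author's own statement) =====
-- stated objective: alternative
-- what changed: Replaces the 2^n bitmask enumeration of all slide/strict subset splits by an O(n^2) scan over contiguous windows of the sorted unique keys (the slide group must be a block of consecutive keys, so only windows can qualify), checking the prefix+suffix complement as the strict group.
import Mathlib
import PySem

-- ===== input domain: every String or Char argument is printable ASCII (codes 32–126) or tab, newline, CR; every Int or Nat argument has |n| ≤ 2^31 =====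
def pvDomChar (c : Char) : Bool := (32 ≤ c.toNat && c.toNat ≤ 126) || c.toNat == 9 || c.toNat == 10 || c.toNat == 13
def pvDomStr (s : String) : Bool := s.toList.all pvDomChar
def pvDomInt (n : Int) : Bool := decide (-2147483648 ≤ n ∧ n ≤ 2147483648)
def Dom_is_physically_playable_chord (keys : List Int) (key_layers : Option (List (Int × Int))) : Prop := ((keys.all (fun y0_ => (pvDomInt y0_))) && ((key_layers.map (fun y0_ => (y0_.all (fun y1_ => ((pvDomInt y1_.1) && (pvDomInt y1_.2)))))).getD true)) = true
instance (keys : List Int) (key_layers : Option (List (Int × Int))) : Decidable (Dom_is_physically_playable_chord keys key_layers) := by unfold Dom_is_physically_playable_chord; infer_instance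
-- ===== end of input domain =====

-- B replaces A's 2^n bitmask enumeration of slide/strict splits by an O(n^2) scan over
-- contiguous windows of the sorted unique keys (objective: alternative decomposition).

-- ===== PORT A =====
-- _same_layer_adjacent of A
def pvA_sla (key_layers : Option (List (Int × Int))) (a b : Int) : Bool :=
  if b - a ≠ 1 then false
  else if (match key_layers with
           | some d => decide ((PySem.Dict.mk d).get? a ≠ (PySem.Dict.mk d).get? b)
           | none => false) then false
  else true

-- _consecutive of A (indices produced by range(len(ks)-1) are always in range, so pyGetD is exact)
def pvA_consecutive (key_layers : Option (List (Int × Int))) (ks : List Int) : Bool :=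
  decide (ks.length ≤ 1) ||
  (PySem.List.pyRange 0 ((ks.length : Int) - 1)).all (fun i =>
    pvA_sla key_layers (PySem.List.pyGetD ks i 0) (PySem.List.pyGetD ks (i + 1) 0))

-- _strict_ok of A
def pvA_strict (key_layers : Option (List (Int × Int))) (ks : List Int) : Bool :=
  decide (ks.length ≤ 1) ||
  (decide (ks.length = 2) && pvA_sla key_layers (PySem.List.pyGetD ks 0 0) (PySem.List.pyGetD ks 1 0))

def is_physically_playable_chord (keys : List Int) (key_layers : Option (List (Int × Int))) : Bool :=
  if keys.length ≤ 2 then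
    match key_layers with
    | none => true
    | some d =>
      if keys.length = 2 then
        let s := PySem.List.sorted keys (fun x => x)
        let k0 := PySem.List.pyGetD s 0 0
        let k1 := PySem.List.pyGetD s 1 0
        if (k1 - k0).natAbs = 1 && ((PySem.Dict.mk d).get? k0 ≠ (PySem.Dict.mk d).get? k1) then false
        else true
      else true
  else
    let unique := PySem.List.sorted (PySem.Set.ofList keys) (fun x => x)
    let n := unique.length
    if 4 < n then false
    else
      (PySem.List.pyRange 0 (2 ^ n : Nat)).any (fun mask =>
        let slide := (PySem.List.pyRange 0 (n : Int)).filterMap (fun i =>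
          if PySem.Int.band mask (2 ^ i.toNat) ≠ 0 then some (PySem.List.pyGetD unique i 0) else none)
        let strict := (PySem.List.pyRange 0 (n : Int)).filterMap (fun i =>
          if PySem.Int.band mask (2 ^ i.toNat) = 0 then some (PySem.List.pyGetD unique i 0) else none)
        if slide.length < 1 || 2 < strict.length then false
        else pvA_consecutive key_layers slide && pvA_strict key_layers strict)

-- ===== PORT B =====
-- same_layer_adjacent of B
def pvB_sla (key_layers : Option (List (Int × Int))) (a b : Int) : Bool :=
  decide (b - a = 1) &&
  (match key_layers with
   | none => true
   | some d => decide ((PySem.Dict.mk d).get? a = (PySem.Dict.mk d).get? b))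

-- window_ok of B (rest has length 2 exactly when both pyGetD indices are in range, so pyGetD is exact)
def pvB_windowOk (key_layers : Option (List (Int × Int))) (unique : List Int) (i j : Int) : Bool :=
  let win := PySem.List.slice unique (some i) (some j)
  let rest := PySem.List.slice unique none (some i) ++ PySem.List.slice unique (some j) none
  if 2 < rest.length then false
  else if (win.zip win.tail).any (fun p => !(pvB_sla key_layers p.1 p.2)) then false
  else if decide (rest.length = 2) && !(pvB_sla key_layers (PySem.List.pyGetD rest 0 0) (PySem.List.pyGetD rest 1 0)) then false
  else true

def is_physically_playable_chord_alt (keys : List Int) (key_layers : Option (List (Int × Int))) : Bool :=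
  if keys.length ≤ 2 then
    match key_layers with
    | none => true
    | some d =>
      if keys.length = 2 then
        let s := PySem.List.sorted keys (fun x => x)
        let k0 := PySem.List.pyGetD s 0 0
        let k1 := PySem.List.pyGetD s 1 0
        if (k1 - k0).natAbs = 1 && ((PySem.Dict.mk d).get? k0 ≠ (PySem.Dict.mk d).get? k1) then false
        else true
      else true
  else
    let unique := PySem.List.sorted (PySem.Set.ofList keys) (fun x => x)
    let n := unique.length
    if 4 < n then false
    else
      (PySem.List.pyRange 0 (n : Int)).any (fun i =>
        (PySem.List.pyRange (i + 1) ((n : Int) + 1)).any (fun j =>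
          pvB_windowOk key_layers unique i j))

-- ===== PRECONDITION & SPEC =====
def Spec_is_physically_playable_chord (keys : List Int) (key_layers : Option (List (Int × Int))) (out : Bool) : Prop := out = is_physically_playable_chord_alt keys key_layers
instance (keys : List Int) (key_layers : Option (List (Int × Int))) (out : Bool) : Decidable (Spec_is_physically_playable_chord keys key_layers out) := by unfold Spec_is_physically_playable_chord; infer_instance

-- ===== CLAIM (what is proved, stated in full; the proofs are below) =====
def Claim_equal_is_physically_playable_chord : Prop := ∀ (keys : List Int) (key_layers : Option (List (Int × Int))), Dom_is_physically_playable_chord keys key_layers → Spec_is_physically_playable_chord keys key_layers (is_physically_playable_chord keys key_layers)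

-- ===== LEMMAS AND PROOFS =====

-- the two helper adjacency tests agree
theorem sla_eq (kl : Option (List (Int × Int))) (a b : Int) :
    pvA_sla kl a b = pvB_sla kl a b := by
  unfold pvA_sla pvB_sla; cases kl <;> simp

-- keys that do not differ by exactly 1 are never same-layer-adjacent
theorem sla_far (kl : Option (List (Int × Int))) (a b : Int) (h : b - a ≠ 1) :
    pvB_sla kl a b = false := by
  unfold pvB_sla; simp [h]

-- the core: A's 2^n-mask enumeration equals B's window enumeration on a strictly
-- sorted list of at most 4 keys
set_option maxHeartbeats 2000000 in
theorem enum_eq (kl : Option (List (Int × Int))) (unique : List Int)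
    (hs : unique.Pairwise (· < ·)) (hn : unique.length ≤ 4) :
    ((PySem.List.pyRange 0 (2 ^ unique.length : Nat)).any (fun mask =>
        let slide := (PySem.List.pyRange 0 (unique.length : Int)).filterMap (fun i =>
          if PySem.Int.band mask (2 ^ i.toNat) ≠ 0 then some (PySem.List.pyGetD unique i 0) else none)
        let strict := (PySem.List.pyRange 0 (unique.length : Int)).filterMap (fun i =>
          if PySem.Int.band mask (2 ^ i.toNat) = 0 then some (PySem.List.pyGetD unique i 0) else none)
        if slide.length < 1 || 2 < strict.length then false
        else pvA_consecutive kl slide && pvA_strict kl strict)) =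
    ((PySem.List.pyRange 0 (unique.length : Int)).any (fun i =>
        (PySem.List.pyRange (i + 1) ((unique.length : Int) + 1)).any (fun j =>
          pvB_windowOk kl unique i j))) := by
  have fold : ∀ x y : Int, (decide (y - x = 1) && (match kl with
      | none => true
      | some d => decide ((PySem.Dict.mk d).get? x = (PySem.Dict.mk d).get? y))) = pvB_sla kl x y :=
    fun _ _ => rfl
  have t0 : (0:Int).toNat = 0 := rfl
  have t1 : (1:Int).toNat = 1 := rfl
  have t2 : (2:Int).toNat = 2 := rfl
  have t3 : (3:Int).toNat = 3 := rfl
  have t4 : (4:Int).toNat = 4 := rfl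
  have t5 : (5:Int).toNat = 5 := rfl
  have t6 : (6:Int).toNat = 6 := rfl
  have t7 : (7:Int).toNat = 7 := rfl
  have t8 : (8:Int).toNat = 8 := rfl
  have t9 : (9:Int).toNat = 9 := rfl
  have t10 : (10:Int).toNat = 10 := rfl
  have t11 : (11:Int).toNat = 11 := rfl
  have t12 : (12:Int).toNat = 12 := rfl
  have t13 : (13:Int).toNat = 13 := rfl
  have t14 : (14:Int).toNat = 14 := rfl
  have t15 : (15:Int).toNat = 15 := rfl
  have t16 : (16:Int).toNat = 16 := rfl
  rcases unique with _ | ⟨a, _ | ⟨b, _ | ⟨c, _ | ⟨d, _ | ⟨e, rest⟩⟩⟩⟩⟩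
  · -- []
    have e2n : PySem.List.pyRange 0 (2 ^ 0 : Nat) = [0] := by decide
    have en : PySem.List.pyRange 0 (0 : Int) = [] := by decide
    simp only [List.length_cons, List.length_nil, e2n]
    norm_num [en, PySem.List.pyRange_one_cons, PySem.List.pyRange_one_eq_nil,
      pvA_consecutive, pvA_strict, pvB_windowOk, pvB_sla, sla_eq, PySem.List.slice_toNat,
      PySem.Int.band, List.filterMap_cons, PySem.List.pyGetD_ofNat',
      PySem.List.slice_to, PySem.List.slice_from, t0, t1, t2, t3, t4, t5, t6, t7, t8, t9, t10, t11, t12, t13, t14, t15, t16]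
  · -- [a]
    have e2n : PySem.List.pyRange 0 (2 ^ 1 : Nat) = [0, 1] := by decide
    have en : PySem.List.pyRange 0 (1 : Int) = [0] := by decide
    simp only [List.length_cons, List.length_nil, e2n]
    norm_num [en, PySem.List.pyRange_one_cons, PySem.List.pyRange_one_eq_nil,
      pvA_consecutive, pvA_strict, pvB_windowOk, pvB_sla, sla_eq, PySem.List.slice_toNat,
      PySem.Int.band, List.filterMap_cons, PySem.List.pyGetD_ofNat',
      PySem.List.slice_to, PySem.List.slice_from, t0, t1, t2, t3, t4, t5, t6, t7, t8, t9, t10, t11, t12, t13, t14, t15, t16]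
  · -- [a, b]
    have e2n : PySem.List.pyRange 0 (2 ^ 2 : Nat) = [0, 1, 2, 3] := by decide
    have en : PySem.List.pyRange 0 (2 : Int) = [0, 1] := by decide
    simp only [List.length_cons, List.length_nil, e2n]
    norm_num [en, PySem.List.pyRange_one_cons, PySem.List.pyRange_one_eq_nil,
      pvA_consecutive, pvA_strict, pvB_windowOk, pvB_sla, sla_eq, PySem.List.slice_toNat,
      PySem.Int.band, List.filterMap_cons, PySem.List.pyGetD_ofNat',
      PySem.List.slice_to, PySem.List.slice_from, t0, t1, t2, t3, t4, t5, t6, t7, t8, t9, t10, t11, t12, t13, t14, t15, t16]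
  · -- [a, b, c]
    have e2n : PySem.List.pyRange 0 (2 ^ 3 : Nat) = [0, 1, 2, 3, 4, 5, 6, 7] := by decide
    have en : PySem.List.pyRange 0 (3 : Int) = [0, 1, 2] := by decide
    simp only [List.length_cons, List.length_nil, e2n]
    norm_num [en, PySem.List.pyRange_one_cons, PySem.List.pyRange_one_eq_nil,
      pvA_consecutive, pvA_strict, pvB_windowOk, pvB_sla, sla_eq, PySem.List.slice_toNat,
      PySem.Int.band, List.filterMap_cons, PySem.List.pyGetD_ofNat',
      PySem.List.slice_to, PySem.List.slice_from, t0, t1, t2, t3, t4, t5, t6, t7, t8, t9, t10, t11, t12, t13, t14, t15, t16]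
    simp only [Nat.reduceAnd, Nat.reduceEqDiff, reduceIte, decide_true]
    norm_num [pvA_consecutive, pvA_strict, pvB_sla, sla_eq, en, PySem.List.pyRange_one_cons,
      PySem.List.pyRange_one_eq_nil, PySem.List.pyGetD_ofNat', t0, t1, t2, t3, t4, t5, t6, t7, t8, t9, t10, t11, t12, t13, t14, t15, t16]
    simp only [fold, List.cons_ne_nil, decide_false, Bool.not_false, Bool.true_and]
    generalize pvB_sla kl a b = x
    generalize pvB_sla kl b c = y
    generalize pvB_sla kl a c = z
    revert x y z
    decide
  · -- [a, b, c, d]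
    have hab : a < b := by simp at hs; omega
    have hbc : b < c := by simp at hs; omega
    have hcd : c < d := by simp at hs; omega
    have zac : pvB_sla kl a c = false := sla_far kl a c (by omega)
    have zad : pvB_sla kl a d = false := sla_far kl a d (by omega)
    have zbd : pvB_sla kl b d = false := sla_far kl b d (by omega)
    have e2n : PySem.List.pyRange 0 (2 ^ 4 : Nat) = [0, 1, 2, 3, 4, 5, 6, 7, 8, 9, 10, 11, 12, 13, 14, 15] := by decide
    have en : PySem.List.pyRange 0 (4 : Int) = [0, 1, 2, 3] := by decide
    simp only [List.length_cons, List.length_nil, e2n]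
    norm_num [en, PySem.List.pyRange_one_cons, PySem.List.pyRange_one_eq_nil,
      pvA_consecutive, pvA_strict, pvB_windowOk, pvB_sla, sla_eq, PySem.List.slice_toNat,
      PySem.Int.band, List.filterMap_cons, PySem.List.pyGetD_ofNat',
      PySem.List.slice_to, PySem.List.slice_from, t0, t1, t2, t3, t4, t5, t6, t7, t8, t9, t10, t11, t12, t13, t14, t15, t16]
    simp only [Nat.reduceAnd, Nat.reduceEqDiff, reduceIte, decide_true]
    norm_num [pvA_consecutive, pvA_strict, pvB_sla, sla_eq, en, PySem.List.pyRange_one_cons,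
      PySem.List.pyRange_one_eq_nil, PySem.List.pyGetD_ofNat', t0, t1, t2, t3, t4, t5, t6, t7, t8, t9, t10, t11, t12, t13, t14, t15, t16]
    simp only [fold, List.cons_ne_nil, decide_false, Bool.not_false, Bool.true_and]
    simp only [zac, zad, zbd, Bool.false_and, Bool.and_false, Bool.or_false, Bool.false_or]
    generalize pvB_sla kl a b = x
    generalize pvB_sla kl b c = y
    generalize pvB_sla kl c d = z
    revert x y z
    decide
  · -- length ≥ 5: contradicts hn
    simp at hn; omega

-- ===== VERDICT (by name: the statement is the Claim_ definition above) =====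
theorem is_physically_playable_chord_spec : Claim_equal_is_physically_playable_chord := by
  intro keys kl _
  unfold Spec_is_physically_playable_chord is_physically_playable_chord is_physically_playable_chord_alt
  by_cases h : keys.length ≤ 2
  · rw [if_pos h, if_pos h]
  · rw [if_neg h, if_neg h]
    simp only []
    have hp : (PySem.List.sorted (PySem.Set.ofList keys) (fun x => x)).Pairwise (· < ·) :=
      PySem.List.sorted_ofList_pairwise_lt keys
    by_cases h4 : 4 < (PySem.List.sorted (PySem.Set.ofList keys) (fun x => x)).length
    · rw [if_pos h4, if_pos h4]
    · rw [if_neg h4, if_neg h4]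
      exact enum_eq kl _ hp (by omega)
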